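-- pv_equiv track=rewrite | github.com/quanturong/LLMalMorph3 | src/automation/auto_fixer.py | _build_fallback_error_context
-- ===== SOURCE A (Python) =====
-- from typing import Dict, List, Optional, Tuple
--
-- def _build_fallback_error_context(errors: List[str]) -> str:
--     """Fallback error context when error analyzer is not available"""
--     missing_headers = [e for e in errors if 'no such file' in e.lower() or 'fatal error' in e.lower()]
--     syntax_errors = [e for e in errors if 'error:' in e.lower() and 'no such file' not in e.lower()]
--
--     context = ""
--     if missing_headers:
--         context += "\n⚠️ MISSING HEADERS DETECTED:\n"
--         for err in missing_headers[:5]: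
--             context += f"    - {err}\n"
--         context += "\n  ACTION: Keep #include lines, add forward declarations for types/functions used so code compiles without the header.\n"
--         context += "  CRITICAL: NEVER remove or comment out ANY #include line.\n\n"
--
--     if syntax_errors:
--         context += "\n⚠️ SYNTAX ERRORS DETECTED:\n"
--         for err in syntax_errors[:5]:
--             context += f"    - {err}\n"
--         context += "\n  ACTION: Fix all syntax issues completely.\n\n"
--
--     return context
-- ===== SOURCE B (Python) =====
-- def _build_fallback_error_context(errors):
--     """Fallback error context built in ONE pass: classify each error once while
--     accumulating each category's bullet text and count directly (cap of 5 bullets)."""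
--     miss_text = ""
--     miss_n = 0
--     syn_text = ""
--     syn_n = 0
--     for e in errors:
--         low = e.lower()
--         nsf = 'no such file' in low
--         if nsf or 'fatal error' in low:
--             miss_n += 1
--             if miss_n <= 5:
--                 miss_text += f"    - {e}\n"
--         if 'error:' in low and not nsf:
--             syn_n += 1
--             if syn_n <= 5:
--                 syn_text += f"    - {e}\n"
--     out = ""
--     if miss_n:
--         out += ("\n\u26a0\ufe0f MISSING HEADERS DETECTED:\n" + miss_text
--                 + "\n  ACTION: Keep #include lines, add forward declarations for types/functions used so code compiles without the header.\n"
--                   "  CRITICAL: NEVER remove or comment out ANY #include line.\n\n")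
--     if syn_n:
--         out += ("\n\u26a0\ufe0f SYNTAX ERRORS DETECTED:\n" + syn_text
--                 + "\n  ACTION: Fix all syntax issues completely.\n\n")
--     return out
-- ===== Notes on version B (the rewrite author's own statement) =====
-- stated objective: alternative
-- what changed: Replaces A's two staged filter-then-format passes by a single left-to-right pass that lowers each error once, classifies it into both categories on the fly, and accumulates each category's bullet text (capped at 5) and count directly, assembling the two blocks at the end.
import Mathlib
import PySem

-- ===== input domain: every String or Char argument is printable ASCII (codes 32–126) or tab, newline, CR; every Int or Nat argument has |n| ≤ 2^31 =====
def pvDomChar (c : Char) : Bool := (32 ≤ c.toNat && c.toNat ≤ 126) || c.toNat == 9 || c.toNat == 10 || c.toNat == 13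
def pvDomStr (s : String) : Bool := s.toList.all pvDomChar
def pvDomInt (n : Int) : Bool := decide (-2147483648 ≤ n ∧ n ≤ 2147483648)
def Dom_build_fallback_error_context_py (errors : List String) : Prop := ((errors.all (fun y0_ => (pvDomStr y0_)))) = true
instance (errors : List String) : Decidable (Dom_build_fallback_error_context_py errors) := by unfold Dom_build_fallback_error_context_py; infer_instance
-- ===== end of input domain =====

-- B replaces A's two staged filter-then-format passes by a single pass that
-- classifies each error once and accumulates both categories' bullet text and
-- counts on the fly; same cost, different traversal/decomposition.

-- ===== PORT A =====
def build_fallback_error_context_py (errors : List String) : String :=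
  let missing_headers := errors.filter (fun e =>
    PySem.Str.isIn "no such file" (PySem.Str.lower e) || PySem.Str.isIn "fatal error" (PySem.Str.lower e))
  let syntax_errors := errors.filter (fun e =>
    PySem.Str.isIn "error:" (PySem.Str.lower e) && !PySem.Str.isIn "no such file" (PySem.Str.lower e))
  let context := ""
  let context :=
    if !missing_headers.isEmpty then
      let c := context ++ "\n⚠️ MISSING HEADERS DETECTED:\n"
      let c := (PySem.List.slice missing_headers none (some 5)).foldl
        (fun acc err => acc ++ "    - " ++ err ++ "\n") c
      let c := c ++ "\n  ACTION: Keep #include lines, add forward declarations for types/functions used so code compiles without the header.\n"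
      c ++ "  CRITICAL: NEVER remove or comment out ANY #include line.\n\n"
    else context
  let context :=
    if !syntax_errors.isEmpty then
      let c := context ++ "\n⚠️ SYNTAX ERRORS DETECTED:\n"
      let c := (PySem.List.slice syntax_errors none (some 5)).foldl
        (fun acc err => acc ++ "    - " ++ err ++ "\n") c
      c ++ "\n  ACTION: Fix all syntax issues completely.\n\n"
    else context
  context

-- ===== PORT B =====
-- the single classifying pass of Source B: state = (missing text, missing count, syntax text, syntax count)
def pvLoop : List String → String × Nat × String × Nat → String × Nat × String × Nat
  | [], st => st
  | e :: rest, (ms, mn, ss, sn) =>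
      let low := PySem.Str.lower e
      let nsf := PySem.Str.isIn "no such file" low
      let ms' := if nsf || PySem.Str.isIn "fatal error" low then
          (if mn + 1 ≤ 5 then ms ++ "    - " ++ e ++ "\n" else ms) else ms
      let mn' := if nsf || PySem.Str.isIn "fatal error" low then mn + 1 else mn
      let ss' := if PySem.Str.isIn "error:" low && !nsf then
          (if sn + 1 ≤ 5 then ss ++ "    - " ++ e ++ "\n" else ss) else ss
      let sn' := if PySem.Str.isIn "error:" low && !nsf then sn + 1 else sn
      pvLoop rest (ms', mn', ss', sn')

def build_fallback_error_context_py_alt (errors : List String) : String :=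
  let st := pvLoop errors ("", 0, "", 0)
  let out := ""
  let out :=
    if st.2.1 ≠ 0 then
      out ++ ("\n⚠️ MISSING HEADERS DETECTED:\n" ++ st.1
        ++ "\n  ACTION: Keep #include lines, add forward declarations for types/functions used so code compiles without the header.\n  CRITICAL: NEVER remove or comment out ANY #include line.\n\n")
    else out
  let out :=
    if st.2.2.2 ≠ 0 then
      out ++ ("\n⚠️ SYNTAX ERRORS DETECTED:\n" ++ st.2.2.1
        ++ "\n  ACTION: Fix all syntax issues completely.\n\n")
    else out
  out

-- ===== PRECONDITION & SPEC =====
def Spec_build_fallback_error_context_py (errors : List String) (out : String) : Prop := out = build_fallback_error_context_py_alt errors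
instance (errors : List String) (out : String) : Decidable (Spec_build_fallback_error_context_py errors out) := by unfold Spec_build_fallback_error_context_py; infer_instance

-- ===== CLAIM (what is proved, stated in full; the proofs are below) =====
def Claim_equal_build_fallback_error_context_py : Prop := ∀ (errors : List String), Dom_build_fallback_error_context_py errors → Spec_build_fallback_error_context_py errors (build_fallback_error_context_py errors)

-- ===== LEMMAS AND PROOFS =====

def pvPredM (e : String) : Bool :=
  PySem.Str.isIn "no such file" (PySem.Str.lower e) || PySem.Str.isIn "fatal error" (PySem.Str.lower e)
def pvPredS (e : String) : Bool :=
  PySem.Str.isIn "error:" (PySem.Str.lower e) && !PySem.Str.isIn "no such file" (PySem.Str.lower e)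
def pvBull (l : List String) : String := l.foldl (fun acc e => acc ++ "    - " ++ e ++ "\n") ""

-- the bullet fold factors through its accumulator
theorem bull_shift (l : List String) (c : String) :
    l.foldl (fun acc e => acc ++ "    - " ++ e ++ "\n") c = c ++ pvBull l := by
  induction l generalizing c with
  | nil => simp [pvBull]
  | cons x t ih =>
      simp only [pvBull, List.foldl_cons]
      rw [ih, ih ("" ++ "    - " ++ x ++ "\n")]
      simp [String.append_assoc]

-- bulleting a cons splits off the first bullet
theorem pvBull_cons (e : String) (l : List String) :
    pvBull (e :: l) = ("    - " ++ e ++ "\n") ++ pvBull l := by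
  rw [pvBull, List.foldl_cons, bull_shift]
  simp

-- one category's text+cap update agrees with bulleting the first five of the filtered list
theorem take_bull_succ (e : String) (L : List String) (ms : String) (mn : Nat) (h : mn + 1 ≤ 5) :
    (ms ++ "    - " ++ e ++ "\n") ++ pvBull (L.take (5 - (mn + 1)))
      = ms ++ pvBull ((e :: L).take (5 - mn)) := by
  rw [show 5 - mn = (5 - (mn + 1)) + 1 by omega, List.take_succ_cons, pvBull_cons]
  simp [String.append_assoc]

theorem take_bull_over (e : String) (L : List String) (ms : String) (mn : Nat) (h : ¬ mn + 1 ≤ 5) :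
    ms ++ pvBull (L.take (5 - (mn + 1))) = ms ++ pvBull ((e :: L).take (5 - mn)) := by
  rw [show 5 - (mn + 1) = 0 by omega, show 5 - mn = 0 by omega]
  simp

-- invariant of the single classifying pass
theorem pvLoop_spec (l : List String) (ms ss : String) (mn sn : Nat) :
    pvLoop l (ms, mn, ss, sn)
      = (ms ++ pvBull ((l.filter pvPredM).take (5 - mn)), mn + (l.filter pvPredM).length,
         ss ++ pvBull ((l.filter pvPredS).take (5 - sn)), sn + (l.filter pvPredS).length) := by
  induction l generalizing ms mn ss sn with
  | nil => simp [pvLoop, pvBull]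
  | cons e rest ih =>
      simp only [pvLoop]
      rw [show (PySem.Str.isIn "no such file" (PySem.Str.lower e) || PySem.Str.isIn "fatal error" (PySem.Str.lower e)) = pvPredM e from rfl]
      rw [show (PySem.Str.isIn "error:" (PySem.Str.lower e) && !PySem.Str.isIn "no such file" (PySem.Str.lower e)) = pvPredS e from rfl]
      rw [ih]
      cases hcm : pvPredM e <;> cases hcs : pvPredS e <;>
        simp only [hcm, hcs, Bool.false_eq_true, if_true, if_false,
          List.filter_cons, List.length_cons, Prod.mk.injEq] <;>
      first
        | rfl
        | trivial
        | ((repeat' apply And.intro) <;>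
            first
              | rfl
              | omega
              | (by_cases h : mn + 1 ≤ 5 <;>
                  simp only [h, if_true, if_false] <;>
                  first
                    | exact take_bull_succ _ _ _ _ h
                    | exact take_bull_over _ _ _ _ h)
              | (by_cases h : sn + 1 ≤ 5 <;>
                  simp only [h, if_true, if_false] <;>
                  first
                    | exact take_bull_succ _ _ _ _ h
                    | exact take_bull_over _ _ _ _ h))

-- Python's [:5] slice is take 5
theorem slice_take (L : List String) : PySem.List.slice L none (some 5) = L.take 5 := by
  rw [PySem.List.slice_to L (by norm_num : (0:Int) ≤ 5)]
  rfl

set_option maxRecDepth 8192 in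
theorem foot_pair :
    ("\n  ACTION: Keep #include lines, add forward declarations for types/functions used so code compiles without the header.\n" : String) ++ "  CRITICAL: NEVER remove or comment out ANY #include line.\n\n"
      = "\n  ACTION: Keep #include lines, add forward declarations for types/functions used so code compiles without the header.\n  CRITICAL: NEVER remove or comment out ANY #include line.\n\n" := rfl

set_option maxRecDepth 8192 in
theorem foot_syn (X : String) :
    ("\n  ACTION: Keep #include lines, add forward declarations for types/functions used so code compiles without the header.\n  CRITICAL: NEVER remove or comment out ANY #include line.\n\n" : String) ++ ("\n⚠️ SYNTAX ERRORS DETECTED:\n" ++ X)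
      = "\n  ACTION: Keep #include lines, add forward declarations for types/functions used so code compiles without the header.\n  CRITICAL: NEVER remove or comment out ANY #include line.\n\n\n⚠️ SYNTAX ERRORS DETECTED:\n" ++ X := by
  rw [← String.append_assoc]; rfl

-- ===== VERDICT (by name: the statement is the Claim_ definition above) =====
theorem build_fallback_error_context_py_spec : Claim_equal_build_fallback_error_context_py := by
  intro errors _
  unfold Spec_build_fallback_error_context_py
  unfold build_fallback_error_context_py build_fallback_error_context_py_alt
  rw [show (fun e => PySem.Str.isIn "no such file" (PySem.Str.lower e) || PySem.Str.isIn "fatal error" (PySem.Str.lower e)) = pvPredM from rfl]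
  rw [show (fun e => PySem.Str.isIn "error:" (PySem.Str.lower e) && !PySem.Str.isIn "no such file" (PySem.Str.lower e)) = pvPredS from rfl]
  simp only [pvLoop_spec, slice_take, bull_shift]
  by_cases hM : errors.filter pvPredM = [] <;> by_cases hS : errors.filter pvPredS = [] <;>
    simp [hM, hS, List.length_eq_zero_iff, foot_pair, foot_syn, String.append_assoc]
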